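-- pv_equiv track=rewrite | github.com/sagnikanupam/mathdsl | math_domain_utils.py | numberOfArgs
-- ===== SOURCE A (Python) =====
-- def numberOfArgs(s):
--
--     """
--     Computes the number of times the brackets are perfectly matched (i.e. number of `(` = number of `)` ) to count the number of arguments in that string.
--
--     Inputs:
--     - s is an equation string in prefix notation
--     Returns:
--     - an integer numMatched, which is equivalent to the number of arguments
--
--     """
--     numOpenBrPair = 0
--     numMatched = 0
--     for i in s:
--         if i=="(":
--             numOpenBrPair+=1
--         elif i==")":
--             numOpenBrPair-=1
--             if numOpenBrPair==0:
--                 numMatched+=1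
--     return numMatched
-- ===== SOURCE B (Python) =====
-- def numberOfArgs(s):
--     # Right-to-left characterization: a ')' closes a top-level group exactly when
--     # the balance of everything AFTER it equals the total balance of the string.
--     total = sum((c == "(") - (c == ")") for c in s)
--     after = 0
--     matched = 0
--     for c in reversed(s):
--         if c == ")" and after == total:
--             matched += 1
--         after += (c == "(") - (c == ")")
--     return matched
-- ===== Notes on version B (the rewrite author's own statement) =====
-- stated objective: alternative
-- what changed: Instead of A's forward scan counting closers where a running open-bracket counter returns to zero, B computes the string's total bracket balance once and then scans right-to-left, counting a closing bracket exactly when the balance of the characters after it equals that total.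
import Mathlib
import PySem

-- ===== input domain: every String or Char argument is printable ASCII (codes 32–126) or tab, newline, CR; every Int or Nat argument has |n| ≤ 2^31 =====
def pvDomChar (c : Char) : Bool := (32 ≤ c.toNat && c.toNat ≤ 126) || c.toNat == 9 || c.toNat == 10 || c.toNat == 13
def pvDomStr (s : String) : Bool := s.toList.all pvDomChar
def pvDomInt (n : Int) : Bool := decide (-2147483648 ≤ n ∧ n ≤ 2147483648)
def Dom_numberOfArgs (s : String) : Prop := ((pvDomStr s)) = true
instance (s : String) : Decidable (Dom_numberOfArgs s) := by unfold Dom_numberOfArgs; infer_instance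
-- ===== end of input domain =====

-- B replaces A's forward zero-crossing counter by a right-to-left pass: a closing bracket ends a
-- top-level group iff the balance after it equals the string's total balance (alternative, same cost).


-- ===== PORT A =====
def numberOfArgs (s : String) : Int :=
  (s.toList.foldl
    (fun (st : Int × Int) i =>
      if i = '(' then (st.1 + 1, st.2)
      else if i = ')' then
        let o := st.1 - 1
        (o, if o = 0 then st.2 + 1 else st.2)
      else st)
    (0, 0)).2

-- ===== PORT B =====
-- (c == "(") - (c == ")")
def pvDelta (c : Char) : Int :=
  (if c = '(' then (1 : Int) else 0) - (if c = ')' then (1 : Int) else 0)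

def numberOfArgs_alt (s : String) : Int :=
  let total : Int := (s.toList.map pvDelta).sum
  (s.toList.reverse.foldl
    (fun (st : Int × Int) c =>
      (st.1 + pvDelta c, if c = ')' ∧ st.1 = total then st.2 + 1 else st.2))
    (0, 0)).2

-- ===== PRECONDITION & SPEC =====
def Spec_numberOfArgs (s : String) (out : Int) : Prop := out = numberOfArgs_alt s
instance (s : String) (out : Int) : Decidable (Spec_numberOfArgs s out) := by unfold Spec_numberOfArgs; infer_instance

-- ===== CLAIM (what is proved, stated in full; the proofs are below) =====
def Claim_equal_numberOfArgs : Prop := ∀ (s : String), Dom_numberOfArgs s → Spec_numberOfArgs s (numberOfArgs s)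

-- ===== LEMMAS AND PROOFS =====

-- B's backward step, as a foldr step (foldl over the reversed list = foldr over the list)
def pvStepB (T : Int) (c : Char) (st : Int × Int) : Int × Int :=
  (st.1 + pvDelta c, if c = ')' ∧ st.1 = T then st.2 + 1 else st.2)

-- the first component of B's fold is the delta-sum of the list, whatever T and the init counter
theorem pvStepB_fst (cs : List Char) (T m : Int) :
    (cs.foldr (pvStepB T) (0, m)).1 = (cs.map pvDelta).sum := by
  induction cs with
  | nil => simp
  | cons c cs ih => simp [pvStepB, ih]; ring

-- the counter component is the init plus a count independent of the init
theorem pvStepB_shift (cs : List Char) (T m : Int) :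
    (cs.foldr (pvStepB T) (0, m)).2 = m + (cs.foldr (pvStepB T) (0, 0)).2 := by
  induction cs generalizing m with
  | nil => simp
  | cons c cs ih =>
    simp only [List.foldr_cons, pvStepB]
    by_cases h : c = ')' ∧ (cs.foldr (pvStepB T) (0, m)).1 = T
    · rw [pvStepB_fst] at h
      rw [if_pos (by rw [pvStepB_fst]; exact h), if_pos (by rw [pvStepB_fst]; exact h)]
      rw [ih m, ih 0]; try ring
    · rw [pvStepB_fst] at h
      rw [if_neg (by rw [pvStepB_fst]; exact h), if_neg (by rw [pvStepB_fst]; exact h)]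
      rw [ih m, ih 0]; try ring

-- A's fold from (b, m) equals B's backward fold with threshold T = sum + b
theorem pvMain (cs : List Char) (b m T : Int) (hT : T = (cs.map pvDelta).sum + b) :
    (cs.foldl
      (fun (st : Int × Int) i =>
        if i = '(' then (st.1 + 1, st.2)
        else if i = ')' then
          let o := st.1 - 1
          (o, if o = 0 then st.2 + 1 else st.2)
        else st)
      (b, m)).2
    = (cs.foldr (pvStepB T) (0, m)).2 := by
  induction cs generalizing b m with
  | nil => simp
  | cons c cs ih =>
    simp only [List.foldl_cons, List.foldr_cons, pvStepB, pvStepB_fst]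
    simp only [List.map_cons, List.sum_cons] at hT
    by_cases hop : c = '('
    · subst hop
      rw [if_pos rfl, if_neg (by simp)]
      exact ih (b + 1) m (by simp [pvDelta] at hT ⊢; omega)
    · by_cases hcl : c = ')'
      · subst hcl
        rw [if_neg (by decide), if_pos rfl]
        have hd : pvDelta ')' = -1 := by decide
        have heq : ((cs.map pvDelta).sum = T) ↔ (b - 1 = 0) := by
          rw [hd] at hT; constructor <;> intro h <;> omega
        by_cases hz : b - 1 = 0
        · rw [if_pos hz, if_pos ⟨rfl, heq.mpr hz⟩]
          rw [ih (b - 1) (m + 1) (by rw [hd] at hT; omega)]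
          rw [pvStepB_shift cs T (m + 1), pvStepB_shift cs T m]; ring
        · rw [if_neg hz, if_neg (by rintro ⟨-, h⟩; exact hz (heq.mp h))]
          exact ih (b - 1) m (by rw [hd] at hT; omega)
      · rw [if_neg hop, if_neg hcl, if_neg (by rintro ⟨h, -⟩; exact hcl h)]
        exact ih b m (by simp [pvDelta, hop, hcl] at hT ⊢; omega)

-- ===== VERDICT (by name: the statement is the Claim_ definition above) =====
theorem numberOfArgs_spec : Claim_equal_numberOfArgs := by
  intro s _
  unfold Spec_numberOfArgs numberOfArgs numberOfArgs_alt
  simp only [List.foldl_reverse]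
  exact pvMain s.toList 0 0 _ (by ring)
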